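-- pv_equiv track=rewrite | github.com/masashi-y/depccg | depccg/tools/ja/keyaki_reader.py | find_non_nested_char
-- ===== SOURCE A (Python) =====
-- def find_non_nested_char(haystack, needles):
--     open_brackets = 0
--     for i in range(len(haystack) -1, -1, -1):
--         char = haystack[i]
--         open_brackets += char == '<'
--         open_brackets -= char == '>'
--         if open_brackets == 0 and char in needles:
--             return i
--     return -1
-- ===== SOURCE B (Python) =====
-- def find_non_nested_char(haystack, needles):
--     target = haystack.count('<') - haystack.count('>')
--     running = 0
--     best = -1
--     for i, char in enumerate(haystack):
--         if running == target and char in needles: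
--             best = i
--         running += char == '<'
--         running -= char == '>'
--     return best
-- ===== Notes on version B (the rewrite author's own statement) =====
-- stated objective: alternative
-- what changed: Replaces the backward scan with early return by a single forward pass: precompute the total bracket imbalance, then record (overwriting) every index whose running prefix balance equals it, returning the last recorded index.
import Mathlib
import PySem

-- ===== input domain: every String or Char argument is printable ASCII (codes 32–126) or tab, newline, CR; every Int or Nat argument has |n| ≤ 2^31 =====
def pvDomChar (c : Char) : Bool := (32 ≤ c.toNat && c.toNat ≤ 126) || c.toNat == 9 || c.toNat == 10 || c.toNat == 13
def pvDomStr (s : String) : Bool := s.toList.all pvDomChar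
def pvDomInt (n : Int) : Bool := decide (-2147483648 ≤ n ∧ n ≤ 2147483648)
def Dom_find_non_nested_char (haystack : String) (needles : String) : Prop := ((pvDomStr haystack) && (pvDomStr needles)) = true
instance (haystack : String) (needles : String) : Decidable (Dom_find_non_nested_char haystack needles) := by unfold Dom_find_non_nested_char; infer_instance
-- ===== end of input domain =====

-- B replaces A's backward early-return scan by a forward pass with a precomputed
-- total bracket imbalance and an overwriting "last hit" accumulator (alternative decomposition, same cost).


-- ===== PORT A =====
-- A iterates i over range(len-1, -1, -1), updating open_brackets and returning i on the
-- first index whose suffix bracket balance is 0 and whose char is in needles.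
-- The loop is the Nat recursion below: argument m+1 processes index m (always in range,
-- so getD's default is never read).
def fnncA_loop (cs : List Char) (nd : List Char) : Nat → Int → Int
  | 0, _ => -1
  | m + 1, ob =>
    let c := cs.getD m ' '
    let ob := ob + (if c = '<' then 1 else 0) - (if c = '>' then 1 else 0)
    if ob = 0 ∧ c ∈ nd then (m : Int) else fnncA_loop cs nd m ob

def find_non_nested_char (haystack : String) (needles : String) : Int :=
  fnncA_loop haystack.toList needles.toList haystack.toList.length 0

-- ===== PORT B =====
-- forward enumerate loop: i is the index, run the prefix balance, best the last recorded hit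
def fnncB_loop (nd : List Char) (t : Int) : List Char → Nat → Int → Int → Int
  | [], _, _, best => best
  | c :: rest, i, run, best =>
    let best := if run = t ∧ c ∈ nd then (i : Int) else best
    fnncB_loop nd t rest (i + 1) (run + (if c = '<' then 1 else 0) - (if c = '>' then 1 else 0)) best

def find_non_nested_char_alt (haystack : String) (needles : String) : Int :=
  let cs := haystack.toList
  -- str.count of a single character = list count (exact: non-overlapping substring count)
  let t : Int := (cs.count '<' : Int) - (cs.count '>' : Int)
  fnncB_loop needles.toList t cs 0 0 (-1)

-- ===== PRECONDITION & SPEC =====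
def Spec_find_non_nested_char (haystack : String) (needles : String) (out : Int) : Prop := out = find_non_nested_char_alt haystack needles
instance (haystack : String) (needles : String) (out : Int) : Decidable (Spec_find_non_nested_char haystack needles out) := by unfold Spec_find_non_nested_char; infer_instance

-- ===== CLAIM (what is proved, stated in full; the proofs are below) =====
def Claim_equal_find_non_nested_char : Prop := ∀ (haystack : String) (needles : String), Dom_find_non_nested_char haystack needles → Spec_find_non_nested_char haystack needles (find_non_nested_char haystack needles)

-- ===== LEMMAS AND PROOFS =====

-- bracket balance of a list
def fnncBal (l : List Char) : Int := (l.count '<' : Int) - (l.count '>' : Int)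

-- per-character balance contribution
def fnncD (c : Char) : Int := (if c = '<' then 1 else 0) - (if c = '>' then 1 else 0)

-- common downward spec: greatest index i < m with bal (drop i) = 0 and cs[i] ∈ nd, else -1
def fnncSpec (cs nd : List Char) : Nat → Int
  | 0 => -1
  | m + 1 =>
    if fnncBal (cs.drop m) = 0 ∧ cs.getD m ' ' ∈ nd then (m : Int) else fnncSpec cs nd m

theorem fnncBal_append (l₁ l₂ : List Char) : fnncBal (l₁ ++ l₂) = fnncBal l₁ + fnncBal l₂ := by
  simp [fnncBal, List.count_append]; ring

theorem fnncBal_cons (c : Char) (l : List Char) : fnncBal (c :: l) = fnncD c + fnncBal l := by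
  by_cases h1 : c = '<' <;> by_cases h2 : c = '>' <;>
    simp [fnncBal, fnncD, h1, h2] <;> ring

theorem fnncBal_drop (cs : List Char) (m : Nat) (hm : m < cs.length) :
    fnncBal (cs.drop m) = fnncD (cs.getD m ' ') + fnncBal (cs.drop (m + 1)) := by
  have h := List.getElem_cons_drop (as := cs) (i := m) hm
  calc fnncBal (cs.drop m) = fnncBal (cs[m] :: cs.drop (m + 1)) := by rw [h]
    _ = fnncD (cs.getD m ' ') + fnncBal (cs.drop (m + 1)) := by
        rw [fnncBal_cons, List.getD_eq_getElem cs ' ' hm]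

-- A's loop computes the downward spec
theorem fnncA_eq_spec (cs nd : List Char) :
    ∀ m, m ≤ cs.length → fnncA_loop cs nd m (fnncBal (cs.drop m)) = fnncSpec cs nd m := by
  intro m
  induction m with
  | zero => intro _; simp [fnncA_loop, fnncSpec]
  | succ k ih =>
    intro hk
    have hlt : k < cs.length := hk
    have hb : fnncBal (cs.drop (k + 1)) + (if cs.getD k ' ' = '<' then (1:Int) else 0)
        - (if cs.getD k ' ' = '>' then (1:Int) else 0) = fnncBal (cs.drop k) := by
      rw [fnncBal_drop cs k hlt]; simp [fnncD]; ring
    simp only [fnncA_loop, fnncSpec, hb]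
    split_ifs with h
    · rfl
    · exact ih (Nat.le_of_lt hlt)

theorem fnncA_spec (cs nd : List Char) :
    fnncA_loop cs nd cs.length 0 = fnncSpec cs nd cs.length := by
  have h := fnncA_eq_spec cs nd cs.length (le_refl _)
  simpa [fnncBal] using h

-- B's loop, read from the back: a final element either overwrites or is transparent
theorem fnncB_snoc (nd : List Char) (t : Int) (l : List Char) (c : Char) :
    ∀ (i : Nat) (run best : Int),
    fnncB_loop nd t (l ++ [c]) i run best =
      (if run + fnncBal l = t ∧ c ∈ nd then ((i + l.length : Nat) : Int)
       else fnncB_loop nd t l i run best) := by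
  induction l with
  | nil => intro i run best; simp [fnncB_loop, fnncBal]
  | cons d l' ih =>
    intro i run best
    simp only [List.cons_append, fnncB_loop, ih]
    have hb : run + (if d = '<' then (1:Int) else 0) - (if d = '>' then (1:Int) else 0)
        + fnncBal l' = run + fnncBal (d :: l') := by
      rw [fnncBal_cons]; simp [fnncD]; ring
    rw [hb]
    have hn : (i + 1 + l'.length : Nat) = (i + (d :: l').length : Nat) := by
      simp; omega
    rw [hn]

-- B on a prefix computes the upward variant of the spec (condition on prefix balance)
def fnncSpecB (cs nd : List Char) (t : Int) : Nat → Int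
  | 0 => -1
  | m + 1 =>
    if fnncBal (cs.take m) = t ∧ cs.getD m ' ' ∈ nd then (m : Int) else fnncSpecB cs nd t m

theorem fnncB_eq_specB (cs nd : List Char) (t : Int) :
    ∀ m, m ≤ cs.length → fnncB_loop nd t (cs.take m) 0 0 (-1) = fnncSpecB cs nd t m := by
  intro m
  induction m with
  | zero => intro _; simp [fnncB_loop, fnncSpecB]
  | succ k ih =>
    intro hk
    have hlt : k < cs.length := hk
    have htake : cs.take (k + 1) = cs.take k ++ [cs.getD k ' '] := by
      rw [List.getD_eq_getElem cs ' ' hlt]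
      exact List.take_succ_eq_append_getElem hlt
    rw [htake, fnncB_snoc]
    have hlen : (cs.take k).length = k := List.length_take_of_le (Nat.le_of_lt hlt)
    simp only [fnncSpecB, hlen, zero_add]
    split_ifs with h
    · simp
    · exact ih (Nat.le_of_lt hlt)

-- the two specs agree when t is the total balance
theorem fnncSpec_eq (cs nd : List Char) :
    ∀ m, m ≤ cs.length → fnncSpecB cs nd (fnncBal cs) m = fnncSpec cs nd m := by
  intro m
  induction m with
  | zero => intro _; rfl
  | succ k ih =>
    intro hk
    have hsplit : fnncBal (cs.take k) + fnncBal (cs.drop k) = fnncBal cs := by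
      rw [← fnncBal_append, List.take_append_drop]
    have hcond : (fnncBal (cs.take k) = fnncBal cs) ↔ (fnncBal (cs.drop k) = 0) := by omega
    simp only [fnncSpecB, fnncSpec, hcond]
    split_ifs with h
    · rfl
    · exact ih (Nat.le_of_lt hk)

-- ===== VERDICT (by name: the statement is the Claim_ definition above) =====
theorem find_non_nested_char_spec : Claim_equal_find_non_nested_char := by
  intro haystack needles _
  unfold Spec_find_non_nested_char find_non_nested_char find_non_nested_char_alt
  set cs := haystack.toList
  set nd := needles.toList
  have hB : fnncB_loop nd ((cs.count '<' : Int) - (cs.count '>' : Int)) (cs.take cs.length) 0 0 (-1)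
      = fnncSpecB cs nd (fnncBal cs) cs.length := fnncB_eq_specB cs nd (fnncBal cs) cs.length (le_refl _)
  rw [fnncA_spec, ← fnncSpec_eq cs nd cs.length (le_refl _), ← hB, List.take_length]
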